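-- pv_equiv track=rewrite | github.com/mindflowai/mindflow | mindflow/core/diff.py | batch_git_diffs
-- ===== SOURCE A (Python) =====
-- from typing import List
-- from typing import Tuple
--
-- def batch_git_diffs(
--     file_diffs: List[Tuple[str, str]], token_limit: int
-- ) -> List[List[Tuple[str, str]]]:
--     batches = []
--     current_batch: List = []
--     current_batch_size = 0
--     for file_name, diff_content in file_diffs:
--         if len(diff_content) > token_limit:
--             chunks = [
--                 diff_content[i : i + token_limit]
--                 for i in range(0, len(diff_content), token_limit)
--             ]
--             for chunk in chunks:
--                 if current_batch_size + len(chunk) > token_limit * 2: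
--                     batches.append(current_batch)
--                     current_batch = []
--                     current_batch_size = 0
--                 current_batch.append((file_name, chunk))
--                 current_batch_size += len(chunk)
--         elif current_batch_size + len(diff_content) > token_limit * 2:
--             batches.append(current_batch)
--             current_batch = [(file_name, diff_content)]
--             current_batch_size = len(diff_content)
--         else:
--             current_batch.append((file_name, diff_content))
--             current_batch_size += len(diff_content)
--     if current_batch:
--         batches.append(current_batch)
--     return batches
-- ===== SOURCE B (Python) =====
-- def batch_git_diffs(file_diffs, token_limit):
--     # Pass 1: flatten every diff into (file_name, piece) units, chunking oversized diffs.
--     pieces = []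
--     for file_name, diff_content in file_diffs:
--         if len(diff_content) > token_limit:
--             pieces.extend(
--                 (file_name, diff_content[i : i + token_limit])
--                 for i in range(0, len(diff_content), token_limit)
--             )
--         else:
--             pieces.append((file_name, diff_content))
--     # Pass 2: one uniform greedy packing loop over the flattened units.
--     batches = []
--     current_batch = []
--     current_batch_size = 0
--     for name, piece in pieces:
--         if current_batch_size + len(piece) > token_limit * 2:
--             batches.append(current_batch)
--             current_batch = []
--             current_batch_size = 0
--         current_batch.append((name, piece))
--         current_batch_size += len(piece)
--     if current_batch:
--         batches.append(current_batch)
--     return batches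
-- ===== Notes on version B (the rewrite author's own statement) =====
-- stated objective: alternative
-- what changed: Replaces A's single three-branch loop (inline chunking plus two distinct flush paths) by two passes: first flatten all diffs into a list of (file_name, piece) units, then one uniform greedy packing loop over that flat list.
import Mathlib
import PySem

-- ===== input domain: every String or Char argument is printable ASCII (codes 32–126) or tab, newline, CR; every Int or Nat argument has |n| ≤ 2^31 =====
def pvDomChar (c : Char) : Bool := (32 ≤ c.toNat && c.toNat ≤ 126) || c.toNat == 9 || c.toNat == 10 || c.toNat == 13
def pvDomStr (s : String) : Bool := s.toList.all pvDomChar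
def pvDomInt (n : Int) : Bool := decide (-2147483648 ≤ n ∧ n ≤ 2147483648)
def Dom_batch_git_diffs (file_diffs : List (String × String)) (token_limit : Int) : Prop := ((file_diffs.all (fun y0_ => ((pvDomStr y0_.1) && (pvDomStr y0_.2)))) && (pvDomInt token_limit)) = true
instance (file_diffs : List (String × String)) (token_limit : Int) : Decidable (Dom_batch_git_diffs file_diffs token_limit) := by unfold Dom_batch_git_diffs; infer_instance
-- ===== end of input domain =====

-- B flattens the diffs into (name, piece) units first, then packs them in one uniform greedy loop; same result as A's three-branch loop.

-- ===== PORT A =====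
def batch_git_diffs (file_diffs : List (String × String)) (token_limit : Int) : List (List (String × String)) :=
  let st := file_diffs.foldl
    (fun (st : List (List (String × String)) × List (String × String) × Int) fd =>
      let batches := st.1
      let current_batch := st.2.1
      let current_batch_size := st.2.2
      let file_name := fd.1
      let diff_content := fd.2
      if PySem.Str.len diff_content > token_limit then
        let chunks := (PySem.List.pyRange 0 (PySem.Str.len diff_content) token_limit).map
          (fun i => PySem.Str.slice diff_content (some i) (some (i + token_limit)))
        chunks.foldl
          (fun (st2 : List (List (String × String)) × List (String × String) × Int) chunk =>
            let st3 :=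
              if st2.2.2 + PySem.Str.len chunk > token_limit * 2 then
                (st2.1 ++ [st2.2.1], ([] : List (String × String)), (0 : Int))
              else st2
            (st3.1, st3.2.1 ++ [(file_name, chunk)], st3.2.2 + PySem.Str.len chunk))
          (batches, current_batch, current_batch_size)
      else if current_batch_size + PySem.Str.len diff_content > token_limit * 2 then
        (batches ++ [current_batch], [(file_name, diff_content)], PySem.Str.len diff_content)
      else
        (batches, current_batch ++ [(file_name, diff_content)], current_batch_size + PySem.Str.len diff_content))
    ([], [], 0)
  if st.2.1 ≠ [] then st.1 ++ [st.2.1] else st.1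

-- ===== PORT B =====
-- pass 1: one diff → its list of (name, piece) units
def bgdPieces (token_limit : Int) (fd : String × String) : List (String × String) :=
  if PySem.Str.len fd.2 > token_limit then
    (PySem.List.pyRange 0 (PySem.Str.len fd.2) token_limit).map
      (fun i => (fd.1, PySem.Str.slice fd.2 (some i) (some (i + token_limit))))
  else [fd]

-- pass 2: the uniform greedy packing step
def bgdPack (token_limit : Int)
    (st : List (List (String × String)) × List (String × String) × Int)
    (piece : String × String) : List (List (String × String)) × List (String × String) × Int :=
  let st' :=
    if st.2.2 + PySem.Str.len piece.2 > token_limit * 2 then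
      (st.1 ++ [st.2.1], ([] : List (String × String)), (0 : Int))
    else st
  (st'.1, st'.2.1 ++ [piece], st'.2.2 + PySem.Str.len piece.2)

def batch_git_diffs_alt (file_diffs : List (String × String)) (token_limit : Int) : List (List (String × String)) :=
  let pieces := file_diffs.flatMap (bgdPieces token_limit)
  let st := pieces.foldl (bgdPack token_limit) ([], [], 0)
  if st.2.1 ≠ [] then st.1 ++ [st.2.1] else st.1

-- ===== PRECONDITION & SPEC =====
-- Pre_ excludes exactly the inputs where the Python A raises (ValueError from range(0, len, 0)):
-- token_limit = 0 together with some nonempty diff content; B raises there too.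
def Pre_batch_git_diffs (file_diffs : List (String × String)) (token_limit : Int) : Prop :=
  token_limit ≠ 0 ∨ (file_diffs.all (fun p => p.2 == "")) = true
instance (file_diffs : List (String × String)) (token_limit : Int) : Decidable (Pre_batch_git_diffs file_diffs token_limit) := by unfold Pre_batch_git_diffs; infer_instance

def pvWitness_batch_git_diffs : (List (String × String)) × Int := ([("a.py", "xxxxx"), ("b.py", "yy")], 3)

def Spec_batch_git_diffs (file_diffs : List (String × String)) (token_limit : Int) (out : List (List (String × String))) : Prop := out = batch_git_diffs_alt file_diffs token_limit
instance (file_diffs : List (String × String)) (token_limit : Int) (out : List (List (String × String))) : Decidable (Spec_batch_git_diffs file_diffs token_limit out) := by unfold Spec_batch_git_diffs; infer_instance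

-- ===== CLAIM (what is proved, stated in full; the proofs are below) =====
def Claim_equal_batch_git_diffs : Prop := ∀ (file_diffs : List (String × String)) (token_limit : Int), Dom_batch_git_diffs file_diffs token_limit → Pre_batch_git_diffs file_diffs token_limit → Spec_batch_git_diffs file_diffs token_limit (batch_git_diffs file_diffs token_limit)

-- ===== LEMMAS AND PROOFS =====

-- A's per-diff transition equals folding B's uniform packing step over that diff's pieces.
theorem bgd_step_eq (tl : Int) (st : List (List (String × String)) × List (String × String) × Int)
    (fd : String × String) :
    (if PySem.Str.len fd.2 > tl then
        ((PySem.List.pyRange 0 (PySem.Str.len fd.2) tl).map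
          (fun i => PySem.Str.slice fd.2 (some i) (some (i + tl)))).foldl
          (fun (st2 : List (List (String × String)) × List (String × String) × Int) chunk =>
            let st3 :=
              if st2.2.2 + PySem.Str.len chunk > tl * 2 then
                (st2.1 ++ [st2.2.1], ([] : List (String × String)), (0 : Int))
              else st2
            (st3.1, st3.2.1 ++ [(fd.1, chunk)], st3.2.2 + PySem.Str.len chunk))
          (st.1, st.2.1, st.2.2)
      else if st.2.2 + PySem.Str.len fd.2 > tl * 2 then
        (st.1 ++ [st.2.1], [(fd.1, fd.2)], PySem.Str.len fd.2)
      else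
        (st.1, st.2.1 ++ [(fd.1, fd.2)], st.2.2 + PySem.Str.len fd.2))
    = (bgdPieces tl fd).foldl (bgdPack tl) st := by
  unfold bgdPieces
  by_cases h : PySem.Str.len fd.2 > tl
  · simp only [h, if_pos]
    rw [List.foldl_map, List.foldl_map]
    rfl
  · simp only [h, if_neg, not_false_iff]
    simp only [List.foldl_cons, List.foldl_nil, bgdPack]
    split_ifs <;> simp

theorem bgd_foldl_flatMap (tl : Int) (fds : List (String × String))
    (st : List (List (String × String)) × List (String × String) × Int) :
    fds.foldl
      (fun st fd =>
        if PySem.Str.len fd.2 > tl then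
          ((PySem.List.pyRange 0 (PySem.Str.len fd.2) tl).map
            (fun i => PySem.Str.slice fd.2 (some i) (some (i + tl)))).foldl
            (fun (st2 : List (List (String × String)) × List (String × String) × Int) chunk =>
              let st3 :=
                if st2.2.2 + PySem.Str.len chunk > tl * 2 then
                  (st2.1 ++ [st2.2.1], ([] : List (String × String)), (0 : Int))
                else st2
              (st3.1, st3.2.1 ++ [(fd.1, chunk)], st3.2.2 + PySem.Str.len chunk))
            (st.1, st.2.1, st.2.2)
        else if st.2.2 + PySem.Str.len fd.2 > tl * 2 then
          (st.1 ++ [st.2.1], [(fd.1, fd.2)], PySem.Str.len fd.2)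
        else
          (st.1, st.2.1 ++ [(fd.1, fd.2)], st.2.2 + PySem.Str.len fd.2)) st
    = (fds.flatMap (bgdPieces tl)).foldl (bgdPack tl) st := by
  induction fds generalizing st with
  | nil => rfl
  | cons fd rest ih =>
    rw [List.flatMap_cons, List.foldl_append, List.foldl_cons, ← bgd_step_eq tl st fd, ih]

-- ===== VERDICT (by name: the statement is the Claim_ definition above) =====
theorem batch_git_diffs_spec : Claim_equal_batch_git_diffs := by
  intro fds tl _ _
  unfold Spec_batch_git_diffs batch_git_diffs batch_git_diffs_alt
  rw [bgd_foldl_flatMap tl fds ([], [], 0)]
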